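-- pv_equiv track=rewrite | github.com/gaminKim/Algorithm-Study | 2022/1월/20220123/박다정/p_1.py | solution
-- ===== SOURCE A (Python) =====
-- def solution(id_list, report, k):
--     answer = []
--     result = {}
--     report_counts = {}
--
--     for users in report:
--         u1, u2 = users.split(' ')
--
--         if u1 not in result:
--             result[u1] = set()
--             result[u1].add(u2)
--         else:
--             result[u1].add(u2)
--
--     for key, values in result.items():
--         for v in values:
--             if v not in report_counts:
--                 report_counts[v] = 1
--             else:
--                 report_counts[v] += 1
--
--     for id in id_list:
--         count = 0
--
--         if id not in result:
--             answer.append(count)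
--             continue
--         for reportee in result[id]:
--             if not reportee :
--                 continue
--             if report_counts[reportee] >= k:
--                 count += 1
--
--         answer.append(count)
--     return answer
-- ===== SOURCE B (Python) =====
-- def solution(id_list, report, k):
--     # Flat dedup of (reporter, reportee) pairs instead of a dict of per-reporter sets.
--     pairs = []
--     seen = set()
--     for users in report:
--         u1, u2 = users.split(' ')
--         if (u1, u2) not in seen:
--             seen.add((u1, u2))
--             pairs.append((u1, u2))
--     # Distinct-report count per reportee.
--     counts = {}
--     for _, u2 in pairs:
--         counts[u2] = counts.get(u2, 0) + 1
--     # One pass over the deduped pairs, tallying per reporter.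
--     per_reporter = {}
--     for u1, u2 in pairs:
--         if u2 and counts[u2] >= k:
--             per_reporter[u1] = per_reporter.get(u1, 0) + 1
--     return [per_reporter.get(i, 0) for i in id_list]
-- ===== Notes on version B (the rewrite author's own statement) =====
-- stated objective: alternative
-- what changed: Replaces A's dict-of-per-reporter-sets plus a per-id inner scan by a flat deduped (reporter, reportee) pair list: one counter over pairs per reportee, one pass over pairs tallying per reporter, and the answer read off by dict lookups per id.
import Mathlib
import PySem

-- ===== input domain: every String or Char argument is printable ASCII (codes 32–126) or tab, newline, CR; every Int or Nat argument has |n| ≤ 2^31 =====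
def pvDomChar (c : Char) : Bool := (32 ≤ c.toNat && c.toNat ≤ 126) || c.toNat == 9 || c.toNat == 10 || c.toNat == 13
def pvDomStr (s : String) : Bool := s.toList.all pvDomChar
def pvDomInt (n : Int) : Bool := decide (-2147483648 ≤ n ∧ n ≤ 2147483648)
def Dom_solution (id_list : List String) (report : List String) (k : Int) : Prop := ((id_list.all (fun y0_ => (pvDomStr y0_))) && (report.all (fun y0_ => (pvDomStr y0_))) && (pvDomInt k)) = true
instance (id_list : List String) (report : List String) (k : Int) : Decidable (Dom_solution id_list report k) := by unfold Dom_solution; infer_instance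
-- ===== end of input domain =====

-- B replaces A's dict-of-per-reporter-sets and per-id inner scans by one flat deduped pair
-- list with two counting passes (alternative decomposition, similar cost).

-- ===== PORT A =====
-- shared helper for the line `u1, u2 = users.split(' ')` of both Pythons:
-- some (u1, u2) iff the split has exactly two parts; none = ValueError (excluded by Pre_).
def pvSplitPair? (s : String) : Option (String × String) :=
  match PySem.Str.split? s " " with
  | some [u1, u2] => some (u1, u2)
  | _ => none

-- first loop of A: result[u1] = set of reportees of u1 (a ValueError line leaves the state; never reached under Pre_)
def pvAResult (report : List String) : PySem.Dict String (PySem.Set String) :=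
  report.foldl (fun result users =>
    match pvSplitPair? users with
    | some (u1, u2) =>
      if result.contains u1 = false then
        result.insert u1 (PySem.Set.add PySem.Set.empty u2)
      else
        result.insert u1 (PySem.Set.add (result.getD u1 PySem.Set.empty) u2)
    | none => result) PySem.Dict.empty

-- second loop of A: report_counts[v] += 1 over all stored values
def pvAReportCounts (result : PySem.Dict String (PySem.Set String)) : PySem.Dict String Int :=
  result.items.foldl (fun rc kv =>
    kv.2.foldl (fun rc v =>
      if rc.contains v = false then rc.insert v 1
      else rc.modify v 0 (· + 1)) rc) PySem.Dict.empty

-- inner loop of A's third loop; `report_counts[reportee]` is ported as getD _ 0, exact because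
-- every stored reportee is a key of report_counts (phase 2 counted every stored value)
def pvACount (report_counts : PySem.Dict String Int) (k : Int) (values : PySem.Set String) : Int :=
  values.foldl (fun count reportee =>
    if reportee = "" then count
    else if report_counts.getD reportee 0 ≥ k then count + 1 else count) 0

def solution (id_list : List String) (report : List String) (k : Int) : List Int :=
  let result := pvAResult report
  let report_counts := pvAReportCounts result
  id_list.foldl (fun answer id =>
    if result.contains id = false then answer ++ [0]
    else answer ++ [pvACount report_counts k (result.getD id PySem.Set.empty)]) []

-- ===== PORT B =====
-- B's `seen` set + `pairs` list is exactly a PySem.Set (distinct pairs, first-insertion order)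
def pvBPairs (report : List String) : PySem.Set (String × String) :=
  report.foldl (fun pairs users =>
    match pvSplitPair? users with
    | some p => PySem.Set.add pairs p
    | none => pairs) PySem.Set.empty

def pvBCounts (pairs : PySem.Set (String × String)) : PySem.Dict String Int :=
  pairs.foldl (fun d p => d.insert p.2 (d.getD p.2 0 + 1)) PySem.Dict.empty

def pvBPer (counts : PySem.Dict String Int) (k : Int) (pairs : PySem.Set (String × String)) :
    PySem.Dict String Int :=
  pairs.foldl (fun d p =>
    if p.2 ≠ "" ∧ counts.getD p.2 0 ≥ k then d.insert p.1 (d.getD p.1 0 + 1) else d)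
    PySem.Dict.empty

def solution_alt (id_list : List String) (report : List String) (k : Int) : List Int :=
  let pairs := pvBPairs report
  let per := pvBPer (pvBCounts pairs) k pairs
  id_list.map (fun i => per.getD i 0)

-- ===== PRECONDITION & SPEC =====
-- Pre_ excludes exactly the inputs where some report line does not split into two pieces at ' ',
-- on which both Pythons raise ValueError at `u1, u2 = users.split(' ')`.
def Pre_solution (id_list : List String) (report : List String) (k : Int) : Prop :=
  ∀ u ∈ report, ((PySem.Str.split? u " ").getD []).length = 2
instance (id_list : List String) (report : List String) (k : Int) : Decidable (Pre_solution id_list report k) := by unfold Pre_solution; infer_instance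
def pvWitness_solution : List String × List String × Int :=
  (["muzi", "frodo", "apeach"], ["muzi frodo", "apeach frodo", "muzi frodo", "apeach muzi"], 2)

def Spec_solution (id_list : List String) (report : List String) (k : Int) (out : List Int) : Prop := out = solution_alt id_list report k
instance (id_list : List String) (report : List String) (k : Int) (out : List Int) : Decidable (Spec_solution id_list report k out) := by unfold Spec_solution; infer_instance

-- ===== CLAIM (what is proved, stated in full; the proofs are below) =====
def Claim_equal_solution : Prop := ∀ (id_list : List String) (report : List String) (k : Int), Dom_solution id_list report k → Pre_solution id_list report k → Spec_solution id_list report k (solution id_list report k)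

-- ===== LEMMAS AND PROOFS =====

-- the deduplicated flat pair list both programs are about
def pvRaw (report : List String) : List (String × String) := report.filterMap pvSplitPair?

def pvReportees (L : List (String × String)) (a : String) : List String :=
  (L.filter (fun p => p.1 == a)).map (·.2)

-- distinct-pair count per reportee, the common counting core
def pvN (L : List (String × String)) (v : String) : Nat :=
  ((PySem.Set.ofList L).filter (fun p => p.2 == v)).length

-- the per-pair "p.2 gets suspended and the pair counts for p.1" predicate, over pvN
def pvCond (L : List (String × String)) (k : Int) (p : String × String) : Bool :=
  decide (p.2 ≠ "") && decide ((pvN L p.2 : Int) ≥ k)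

-- the step of A's first loop, with the two branches collapsed into one insert
def pvFA (d : PySem.Dict String (PySem.Set String)) (p : String × String) :
    PySem.Dict String (PySem.Set String) :=
  d.insert p.1 (PySem.Set.add (d.getD p.1 PySem.Set.empty) p.2)

lemma pvBPairs_aux (report : List String) (acc : PySem.Set (String × String)) :
    report.foldl (fun pairs users =>
      match pvSplitPair? users with
      | some p => PySem.Set.add pairs p
      | none => pairs) acc
    = (report.filterMap pvSplitPair?).foldl PySem.Set.add acc := by
  induction report generalizing acc with
  | nil => rfl
  | cons u rest ih =>
    cases h : pvSplitPair? u with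
    | some p => simp only [List.foldl_cons, List.filterMap_cons, h, ih]
    | none => simp only [List.foldl_cons, List.filterMap_cons, h, ih]

lemma pvBPairs_eq (report : List String) : pvBPairs report = PySem.Set.ofList (pvRaw report) := by
  rw [pvBPairs, pvRaw, PySem.Set.ofList_eq_foldl]
  exact pvBPairs_aux report PySem.Set.empty

-- A's first loop collapsed: both branches are the same insert
lemma pvAResult_eq (report : List String) :
    pvAResult report = (pvRaw report).foldl pvFA PySem.Dict.empty := by
  rw [pvAResult, pvRaw]
  generalize PySem.Dict.empty = acc
  induction report generalizing acc with
  | nil => rfl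
  | cons u rest ih =>
    cases h : pvSplitPair? u with
    | none => simp only [List.foldl_cons, List.filterMap_cons, h, ih]
    | some p =>
      simp only [List.foldl_cons, List.filterMap_cons, h, ih]
      congr 1
      by_cases hc : acc.contains p.1 = false
      · simp [hc, pvFA, PySem.Dict.getD_of_not_contains _ _ hc]
      · simp [hc, pvFA]

lemma getD_fA (L : List (String × String)) (a : String) :
    (L.foldl pvFA PySem.Dict.empty).getD a PySem.Set.empty
      = PySem.Set.ofList (pvReportees L a) := by
  have key : ∀ (d : PySem.Dict String (PySem.Set String)),
      (L.foldl pvFA d).getD a PySem.Set.empty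
        = PySem.Set.update (d.getD a PySem.Set.empty) (pvReportees L a) := by
    induction L with
    | nil => intro d; simp [pvReportees, PySem.Set.update_nil]
    | cons p L ih =>
      intro d
      rw [List.foldl_cons, ih]
      by_cases hpa : p.1 = a
      · have h2 : (pvFA d p).getD a PySem.Set.empty
            = PySem.Set.add (d.getD a PySem.Set.empty) p.2 := by
          simp [pvFA, hpa]
        have h3 : pvReportees (p :: L) a = p.2 :: pvReportees L a := by
          simp [pvReportees, hpa]
        rw [h2, h3, PySem.Set.update_cons]
      · have h2 : (pvFA d p).getD a PySem.Set.empty = d.getD a PySem.Set.empty := by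
          simp [pvFA, PySem.Dict.getD_insert]
          intro h; exact absurd h.symm hpa
        have h3 : pvReportees (p :: L) a = pvReportees L a := by
          simp [pvReportees, hpa]
        rw [h2, h3]
  rw [key PySem.Dict.empty, PySem.Dict.getD_empty]
  exact PySem.Set.update_nil_left _

lemma keys_fA (L : List (String × String)) :
    (L.foldl pvFA PySem.Dict.empty).keys = PySem.Set.ofList (L.map (·.1)) := by
  have h := PySem.Dict.keys_foldl_insert_key (ν := PySem.Set String) L (fun p => p.1)
    (fun d p => PySem.Set.add (d.getD p.1 PySem.Set.empty) p.2) PySem.Dict.empty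
  simpa [pvFA, PySem.Dict.keys_empty, PySem.Set.update_nil_left] using h

lemma nodup_keys_fA (L : List (String × String)) :
    (L.foldl pvFA PySem.Dict.empty).keys.Nodup := by
  exact PySem.Dict.nodup_keys_foldl_insert_key L (fun p => p.1)
    (fun d p => PySem.Set.add (d.getD p.1 PySem.Set.empty) p.2) PySem.Dict.empty
    (by simp)

-- two Nodup lists with the same members have the same length
lemma length_eq_of_nodup_mem {α : Type} (xs ys : List α) (hx : xs.Nodup) (hy : ys.Nodup)
    (h : ∀ z, z ∈ xs ↔ z ∈ ys) : xs.length = ys.length :=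
  ((List.perm_ext_iff_of_nodup hx hy).mpr h).length_eq

lemma mem_reportees (L : List (String × String)) (a v : String) :
    v ∈ pvReportees L a ↔ (a, v) ∈ L := by
  simp only [pvReportees, List.mem_map, List.mem_filter, beq_iff_eq]
  constructor
  · rintro ⟨p, ⟨hpL, hp1⟩, hp2⟩
    obtain ⟨x, y⟩ := p
    simp only at hp1 hp2
    subst hp1; subst hp2; exact hpL
  · intro h; exact ⟨(a, v), ⟨h, rfl⟩, rfl⟩

-- A's counting loop body, named for the lemmas below
def pvRcStep (rc : PySem.Dict String Int) (v : String) : PySem.Dict String Int :=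
  if rc.contains v = false then rc.insert v 1 else rc.modify v 0 (· + 1)

lemma getD_rcStep_fold (l : List String) (rc : PySem.Dict String Int) (w : String) :
    (l.foldl pvRcStep rc).getD w 0 = rc.getD w 0 + (l.count w : Int) := by
  induction l generalizing rc with
  | nil => simp
  | cons x l ih =>
    rw [List.foldl_cons, ih]
    have hstep : (pvRcStep rc x).getD w 0
        = rc.getD w 0 + (if w = x then 1 else 0) := by
      by_cases hc : rc.contains x = false
      · rw [pvRcStep, if_pos hc, PySem.Dict.getD_insert]
        split_ifs with h
        · subst h; rw [PySem.Dict.getD_of_not_contains _ _ hc]; ring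
        · ring
      · rw [pvRcStep, if_neg hc, PySem.Dict.getD_modify]
        split_ifs with h
        · subst h; ring
        · ring
    rw [hstep, List.count_cons]
    by_cases h : w = x
    · simp [h]
      try omega
    · simp [h]
      exact fun e => h e.symm

lemma getD_rcOuter (items : List (String × PySem.Set String)) (rc : PySem.Dict String Int)
    (w : String) :
    (items.foldl (fun rc kv => kv.2.foldl pvRcStep rc) rc).getD w 0
      = rc.getD w 0 + ((items.flatMap (·.2)).count w : Int) := by
  induction items generalizing rc with
  | nil => simp
  | cons kv items ih =>
    rw [List.foldl_cons, ih, getD_rcStep_fold]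
    simp [List.flatMap_cons, List.count_append]
    ring

lemma count_flatMap_snd_map (keys : List String) (g : String → PySem.Set String) (v : String) :
    (((keys.map (fun a => (a, g a))).flatMap (·.2)).count v)
      = (keys.map (fun a => (g a).count v)).sum := by
  induction keys with
  | nil => simp
  | cons a l ih => simp [List.flatMap_cons, List.count_append, ih]

lemma sum_ite_countP (l : List String) (p : String → Prop) [DecidablePred p] :
    (l.map (fun a => if p a then 1 else 0)).sum = l.countP (fun a => decide (p a)) := by
  induction l with
  | nil => simp
  | cons a l ih =>
    by_cases h : p a
    · simp [h, ih]
      omega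
    · simp [h, ih]

-- the keys-side filter has the same length as the pair-side filter (a bijection a ↦ (a, v))
lemma keysfilter_len (L : List (String × String)) (v : String) :
    ((PySem.Set.ofList (L.map (·.1))).filter (fun a => decide ((a, v) ∈ L))).length
      = pvN L v := by
  have h1 : pvN L v
      = ((((PySem.Set.ofList L).filter (fun p => p.2 == v)).map (·.1)).length) := by
    simp [pvN]
  rw [h1]
  apply length_eq_of_nodup_mem
  · exact (PySem.Set.nodup_ofList _).filter _
  · apply List.Nodup.map_on
    · intro p hp q hq hfst
      have hp2 := (List.mem_filter.mp hp).2
      have hq2 := (List.mem_filter.mp hq).2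
      simp only [beq_iff_eq] at hp2 hq2
      obtain ⟨p1, p2⟩ := p; obtain ⟨q1, q2⟩ := q
      simp only at hp2 hq2 hfst
      simp [hfst, hp2, hq2]
    · exact (PySem.Set.nodup_ofList _).filter _
  · intro z
    simp only [List.mem_filter, PySem.Set.mem_ofList, List.mem_map, decide_eq_true_eq,
      beq_iff_eq]
    constructor
    · rintro ⟨_, hzv⟩
      exact ⟨(z, v), ⟨hzv, rfl⟩, rfl⟩
    · rintro ⟨⟨x, y⟩, ⟨hpL, hp2⟩, hp1⟩
      simp only at hp1 hp2
      constructor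
      · exact ⟨(x, y), hpL, hp1⟩
      · rw [← hp1, ← hp2]; exact hpL

lemma getD_rc (report : List String) (v : String) :
    (pvAReportCounts (pvAResult report)).getD v 0 = (pvN (pvRaw report) v : Int) := by
  rw [pvAReportCounts, pvAResult_eq]
  have hstep : (fun (rc : PySem.Dict String Int) (kv : String × PySem.Set String) =>
      kv.2.foldl (fun rc v =>
        if rc.contains v = false then rc.insert v 1 else rc.modify v 0 (· + 1)) rc)
      = fun rc kv => kv.2.foldl pvRcStep rc := rfl
  rw [hstep, getD_rcOuter, PySem.Dict.getD_empty]
  have hcnt : ((((pvRaw report).foldl pvFA PySem.Dict.empty).items.flatMap (·.2)).count v)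
      = pvN (pvRaw report) v := by
    rw [PySem.Dict.items_eq_map_keys _ (nodup_keys_fA _) PySem.Set.empty, keys_fA,
      count_flatMap_snd_map]
    have hone : ((PySem.Set.ofList ((pvRaw report).map (·.1))).map
          (fun a => (((pvRaw report).foldl pvFA PySem.Dict.empty).getD a PySem.Set.empty).count v)).sum
        = ((PySem.Set.ofList ((pvRaw report).map (·.1))).map
          (fun a => if (a, v) ∈ pvRaw report then 1 else 0)).sum := by
      congr 1
      apply List.map_congr_left
      intro a _
      rw [getD_fA]
      by_cases hm : (a, v) ∈ pvRaw report
      · rw [if_pos hm]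
        apply List.count_eq_one_of_mem (PySem.Set.nodup_ofList _)
        rw [PySem.Set.mem_ofList, mem_reportees]
        exact hm
      · rw [if_neg hm]
        apply List.count_eq_zero_of_not_mem
        rw [PySem.Set.mem_ofList, mem_reportees]
        exact hm
    rw [hone, sum_ite_countP, List.countP_eq_length_filter, keysfilter_len]
  rw [hcnt]
  ring

lemma count_map_filter {α : Type} (P : List α) (c : α → Bool) (f : α → String) (v : String) :
    (((P.filter c).map f).count v) = (P.filter (fun p => c p && (f p == v))).length := by
  induction P with
  | nil => simp
  | cons p P ih =>
    by_cases hc : c p = true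
    · by_cases hv : f p = v
      · simp [hc, hv, ih]
      · simp [hc, hv, ih]
    · simp [hc, ih]

lemma foldl_insert_pairs_snd (P : List (String × String)) (d : PySem.Dict String Int) :
    P.foldl (fun d p => d.insert p.2 (d.getD p.2 0 + 1)) d
      = (P.map (·.2)).foldl (fun d x => d.insert x (d.getD x 0 + 1)) d := by
  rw [List.foldl_map]

lemma foldl_insert_pairs_fst (P : List (String × String)) (d : PySem.Dict String Int) :
    P.foldl (fun d p => d.insert p.1 (d.getD p.1 0 + 1)) d
      = (P.map (·.1)).foldl (fun d x => d.insert x (d.getD x 0 + 1)) d := by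
  rw [List.foldl_map]

lemma getD_counts (report : List String) (v : String) :
    (pvBCounts (pvBPairs report)).getD v 0 = (pvN (pvRaw report) v : Int) := by
  rw [pvBCounts, pvBPairs_eq, foldl_insert_pairs_snd,
    PySem.Dict.getD_foldl_insert_add_one, PySem.Dict.getD_empty]
  have h := count_map_filter (PySem.Set.ofList (pvRaw report)) (fun _ => true)
    (fun p : String × String => p.2) v
  simp only [List.filter_true, Bool.true_and] at h
  rw [h, pvN]
  simp

lemma getD_per (report : List String) (k : Int) (i : String) :
    (pvBPer (pvBCounts (pvBPairs report)) k (pvBPairs report)).getD i 0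
      = (((PySem.Set.ofList (pvRaw report)).filter
            (fun p => pvCond (pvRaw report) k p && (p.1 == i))).length : Int) := by
  rw [pvBPer]
  have hcongr : (PySem.Set.ofList (pvRaw report)).foldl
      (fun (d : PySem.Dict String Int) p =>
        if p.2 ≠ "" ∧ (pvBCounts (pvBPairs report)).getD p.2 0 ≥ k then
          d.insert p.1 (d.getD p.1 0 + 1) else d) PySem.Dict.empty
      = ((PySem.Set.ofList (pvRaw report)).filter (pvCond (pvRaw report) k)).foldl
          (fun d p => d.insert p.1 (d.getD p.1 0 + 1)) PySem.Dict.empty := by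
    rw [List.foldl_filter]
    apply PySem.List.foldl_congr_mem
    intro d p _
    by_cases h1 : p.2 = ""
    · simp [pvCond, h1]
    · by_cases h2 : ((pvN (pvRaw report) p.2 : Int) ≥ k)
      · simp [pvCond, h1, h2, getD_counts]
      · simp [pvCond, h1, h2, getD_counts]
  rw [show pvBPairs report = PySem.Set.ofList (pvRaw report) from pvBPairs_eq report] at hcongr ⊢
  rw [hcongr, foldl_insert_pairs_fst, PySem.Dict.getD_foldl_insert_add_one,
    PySem.Dict.getD_empty, count_map_filter]
  ring

lemma aCount_eq (report : List String) (k : Int) (i : String) :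
    pvACount (pvAReportCounts (pvAResult report)) k
        ((pvAResult report).getD i PySem.Set.empty)
      = (((PySem.Set.ofList (pvReportees (pvRaw report) i)).filter
            (fun v => pvCond (pvRaw report) k (i, v))).length : Int) := by
  have hD : (pvAResult report).getD i PySem.Set.empty
      = PySem.Set.ofList (pvReportees (pvRaw report) i) := by
    rw [pvAResult_eq, getD_fA]
  rw [pvACount, hD]
  have hstep : (fun (count : Int) (reportee : String) =>
      if reportee = "" then count
      else if (pvAReportCounts (pvAResult report)).getD reportee 0 ≥ k then count + 1
      else count)
      = fun count reportee =>
        if pvCond (pvRaw report) k (i, reportee) = true then count + 1 else count := by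
    funext c v
    by_cases h1 : v = ""
    · simp [pvCond, h1]
    · by_cases h2 : ((pvN (pvRaw report) v : Int) ≥ k)
      · simp [pvCond, h1, h2, getD_rc]
      · simp [pvCond, h1, h2, getD_rc]
  rw [hstep, PySem.List.foldl_count_if, List.countP_eq_length_filter]
  ring

-- the per-id reportee filter and the per-id pair filter count the same set (v ↦ (i, v))
lemma count_perm (L : List (String × String)) (k : Int) (i : String) :
    ((PySem.Set.ofList (pvReportees L i)).filter (fun v => pvCond L k (i, v))).length
      = ((PySem.Set.ofList L).filter (fun p => pvCond L k p && (p.1 == i))).length := by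
  have hlen : ((PySem.Set.ofList L).filter (fun p => pvCond L k p && (p.1 == i))).length
      = (((PySem.Set.ofList L).filter (fun p => pvCond L k p && (p.1 == i))).map
          (·.2)).length := by
    simp
  rw [hlen]
  apply length_eq_of_nodup_mem
  · exact (PySem.Set.nodup_ofList _).filter _
  · apply List.Nodup.map_on
    · intro p hp q hq hsnd
      have hp2 := (List.mem_filter.mp hp).2
      have hq2 := (List.mem_filter.mp hq).2
      simp only [Bool.and_eq_true, beq_iff_eq] at hp2 hq2
      obtain ⟨p1, p2⟩ := p; obtain ⟨q1, q2⟩ := q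
      simp only at hsnd
      rw [Prod.mk.injEq]
      exact ⟨hp2.2.trans hq2.2.symm, hsnd⟩
    · exact (PySem.Set.nodup_ofList _).filter _
  · intro z
    simp only [List.mem_filter, PySem.Set.mem_ofList, List.mem_map, Bool.and_eq_true,
      beq_iff_eq]
    constructor
    · rintro ⟨hz, hcond⟩
      exact ⟨(i, z), ⟨(mem_reportees _ _ _).mp hz, hcond, rfl⟩, rfl⟩
    · rintro ⟨⟨p1, p2⟩, ⟨hpm, hcond, hp1⟩, hp2⟩
      simp only at hp1 hp2
      subst hp1
      subst hp2
      exact ⟨(mem_reportees _ _ _).mpr hpm, hcond⟩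

-- ===== VERDICT (by name: the statement is the Claim_ definition above) =====
theorem solution_spec : Claim_equal_solution := by
  intro id_list report k _hdom _hpre
  show solution id_list report k = solution_alt id_list report k
  simp only [solution, solution_alt]
  have hfold : (fun (answer : List Int) (id : String) =>
      if (pvAResult report).contains id = false then answer ++ [0]
      else answer ++ [pvACount (pvAReportCounts (pvAResult report)) k
        ((pvAResult report).getD id PySem.Set.empty)])
      = fun answer id => answer ++
          [if (pvAResult report).contains id = false then 0
           else pvACount (pvAReportCounts (pvAResult report)) k
             ((pvAResult report).getD id PySem.Set.empty)] := by
    funext ans id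
    split_ifs <;> rfl
  rw [hfold, PySem.List.foldl_append_singleton_eq_map, List.nil_append]
  apply List.map_congr_left
  intro id _
  have hg : (if (pvAResult report).contains id = false then (0 : Int)
      else pvACount (pvAReportCounts (pvAResult report)) k
        ((pvAResult report).getD id PySem.Set.empty))
      = (((PySem.Set.ofList (pvReportees (pvRaw report) id)).filter
            (fun v => pvCond (pvRaw report) k (id, v))).length : Int) := by
    by_cases hc : (pvAResult report).contains id = false
    · rw [if_pos hc]
      have hnk : id ∉ ((pvRaw report).map (·.1)) := by
        intro hmem
        have hcont : (pvAResult report).contains id = true := by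
          rw [pvAResult_eq, PySem.Dict.contains_iff_mem_keys, keys_fA,
            PySem.Set.mem_ofList]
          exact hmem
        rw [hcont] at hc
        exact absurd hc (by simp)
      have hrep : pvReportees (pvRaw report) id = [] := by
        rw [List.eq_nil_iff_forall_not_mem]
        intro v hv
        exact hnk (List.mem_map.mpr ⟨(id, v), (mem_reportees _ _ _).mp hv, rfl⟩)
      rw [hrep]
      simp
    · rw [if_neg hc, aCount_eq]
  rw [hg, count_perm]
  exact (getD_per report k id).symm
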